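-- pv_equiv track=rewrite | github.com/fancykode/kattis_solutions | egelskahann.py | find
-- ===== SOURCE A (Python) =====
-- def find(c):
--     counter = 0
--     n = 1
--     while True:
--         i = 1
--         counter += 1
--         if counter == c:
--             return i
--         for j in range(1, n):
--             i += 2
--             counter += 1
--             if counter == c:
--                 return i
--         n *= 2
-- ===== SOURCE B (Python) =====
-- def find(c):
--     k = c.bit_length() - 1
--     return 2 * (c - (1 << k)) + 1
-- ===== Notes on version B (the rewrite author's own statement) =====
-- stated objective: faster
-- what changed: Replaces the counter loop over all positions up to c with a closed form: the block index is floor(log2(c)) via bit_length, the value is 2*(c - 2^k) + 1.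
import Mathlib
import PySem

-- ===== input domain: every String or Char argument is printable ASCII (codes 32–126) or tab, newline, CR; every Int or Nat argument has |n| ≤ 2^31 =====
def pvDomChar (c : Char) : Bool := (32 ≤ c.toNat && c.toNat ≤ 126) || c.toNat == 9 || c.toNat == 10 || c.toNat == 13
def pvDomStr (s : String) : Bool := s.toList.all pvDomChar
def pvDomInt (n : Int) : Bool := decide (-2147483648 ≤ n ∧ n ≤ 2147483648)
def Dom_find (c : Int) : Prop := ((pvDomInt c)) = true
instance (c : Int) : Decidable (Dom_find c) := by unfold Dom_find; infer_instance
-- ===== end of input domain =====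

-- B replaces A's O(c) counting loop with the closed form 2*(c - 2^floor(log2 c)) + 1 (faster, asymptotic).
-- Pre_find excludes c ≤ 0, on which A loops forever (never returns).


-- ===== PORT A =====
-- inner 'for j in range(1, n)' loop with early return: (some v) = 'return v',
-- (none, counter') = loop finished with final counter
def findInner (c : Int) (js : List Int) (i counter : Int) : Option Int × Int :=
  match js with
  | [] => (none, counter)
  | _ :: rest =>
    let i' := i + 2
    let counter' := counter + 1
    if counter' = c then (some i', counter') else findInner c rest i' counter'

-- outer 'while True' loop; fuel only makes the (Python-divergent, c ≤ 0) case total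
def findOuter (c : Int) (counter n : Int) (fuel : Nat) : Int :=
  match fuel with
  | 0 => 0
  | fuel + 1 =>
    let counter' := counter + 1
    if counter' = c then 1
    else
      let r := findInner c (PySem.List.pyRange 1 n 1) 1 counter'
      match r.1 with
      | some v => v
      | none => findOuter c r.2 (n * 2) fuel

def find (c : Int) : Int := findOuter c 0 1 (c.toNat + 1)

-- ===== PORT B =====
-- c.bit_length() - 1 for c ≥ 1 is Nat.log2 c.toNat
def find_alt (c : Int) : Int :=
  let k : Nat := Nat.log2 c.toNat
  2 * (c - 2 ^ k) + 1

-- ===== PRECONDITION & SPEC =====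
-- Pre_find excludes c ≤ 0: there A's counter never equals c and the while-loop runs forever.
def Pre_find (c : Int) : Prop := 1 ≤ c
instance (c : Int) : Decidable (Pre_find c) := by unfold Pre_find; infer_instance
def pvWitness_find : Int := 5

def Spec_find (c : Int) (out : Int) : Prop := out = find_alt c
instance (c : Int) (out : Int) : Decidable (Spec_find c out) := by unfold Spec_find; infer_instance

-- ===== CLAIM (what is proved, stated in full; the proofs are below) =====
def Claim_equal_find : Prop := ∀ (c : Int), Dom_find c → Pre_find c → Spec_find c (find c)

-- ===== LEMMAS AND PROOFS =====

-- the inner loop either hits c (if it lies within counter+1 .. counter+len) or ends with counter+len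
theorem findInner_spec (c : Int) (js : List Int) (i counter : Int) :
    findInner c js i counter =
      if counter < c ∧ c ≤ counter + js.length then (some (i + 2 * (c - counter)), c)
      else (none, counter + js.length) := by
  induction js generalizing i counter with
  | nil => simp [findInner]
  | cons x rest ih =>
    simp only [findInner, List.length_cons]
    by_cases h : counter + 1 = c
    · rw [if_pos h, if_pos (by push_cast; omega)]
      simp only [Prod.mk.injEq, Option.some.injEq]
      omega
    · rw [if_neg h, ih]
      by_cases h2 : counter < c ∧ c ≤ counter + ((rest.length : Int) + 1)
      · rw [if_pos (by omega), if_pos (by omega)]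
        simp only [Prod.mk.injEq, Option.some.injEq]
        refine ⟨by omega, trivial⟩
      · rw [if_neg (by omega), if_neg (by omega)]
        simp only [Prod.mk.injEq]
        refine ⟨trivial, by push_cast; omega⟩

theorem log2_eq_of (k : Nat) (c : Int) (h1 : (2:Int) ^ k ≤ c) (h2 : c < 2 ^ (k + 1)) :
    Nat.log2 c.toNat = k := by
  rw [Nat.log2_eq_log_two]
  apply Nat.log_eq_of_pow_le_of_lt_pow
  · have : ((2:Nat) ^ k : Int) ≤ c := by push_cast; exact h1
    omega
  · have : c < ((2:Nat) ^ (k+1) : Int) := by push_cast; exact h2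
    omega

theorem findOuter_spec (fuel : Nat) (k : Nat) (c : Int)
    (h1 : (2:Int) ^ k ≤ c) (h2 : c - 2 ^ k < fuel) :
    findOuter c (2 ^ k - 1) (2 ^ k) fuel = 2 * (c - 2 ^ Nat.log2 c.toNat) + 1 := by
  induction fuel generalizing k with
  | zero => omega
  | succ fuel ih =>
    simp only [findOuter]
    have hpow : (1:Int) ≤ 2 ^ k := one_le_pow₀ (by norm_num)
    have hpows : (2:Int) ^ (k+1) = 2 ^ k * 2 := by ring
    have hlen : ((PySem.List.pyRange 1 (2 ^ k) 1).length : Int) = (2:Int)^k - 1 := by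
      rw [PySem.List.length_pyRange_one]; omega
    by_cases h : (2:Int) ^ k - 1 + 1 = c
    · rw [if_pos h, log2_eq_of k c h1 (by omega)]
      omega
    · rw [if_neg h, findInner_spec]
      by_cases hin : c ≤ 2 ^ k - 1 + 1 + ((PySem.List.pyRange 1 (2 ^ k) 1).length : Int)
      · rw [if_pos ⟨by omega, hin⟩]
        have hk : Nat.log2 c.toNat = k := log2_eq_of k c h1 (by omega)
        dsimp only
        rw [hk]
        omega
      · rw [if_neg (by omega)]
        dsimp only
        have e1 : (2:Int) ^ k - 1 + 1 + ((PySem.List.pyRange 1 (2 ^ k) 1).length : Int)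
            = 2 ^ (k+1) - 1 := by omega
        have e2 : (2:Int) ^ k * 2 = 2 ^ (k+1) := by ring
        rw [e1, e2]
        exact ih (k+1) (by omega) (by omega)

-- ===== VERDICT (by name: the statement is the Claim_ definition above) =====
theorem find_spec : Claim_equal_find := by
  intro c _ hpre
  have hc : (1:Int) ≤ c := hpre
  have h := findOuter_spec (c.toNat + 1) 0 c (by norm_num; omega) (by norm_num)
  norm_num at h
  show find c = find_alt c
  unfold find find_alt
  simpa using h
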